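-- pv_equiv track=rewrite | github.com/BoxiLi/steam_data_analysis | Evaluation.py | data_prep
-- ===== SOURCE A (Python) =====
-- def data_prep(library, games):
--     library_set = set(library)
--     games_set = set(games)
--     prep_user = library_set & games_set
--     index = []
--     prep_game = []
--     for game in games:
--         if game in prep_user:
--             prep_game.append(game)   #save gameid in order
--     for i in range(len(prep_game)):
--         for j in range(len(library)):
--             if prep_game[i] == library[j]:
--                 index.append(j)
--     return set(prep_game), index
-- ===== SOURCE B (Python) =====
-- def data_prep(library, games):
--     idx = {}
--     for j, v in enumerate(library):
--         idx.setdefault(v, []).append(j)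
--     prep_game = [g for g in games if g in idx]
--     index = [j for g in prep_game for j in idx[g]]
--     return set(prep_game), index
-- ===== Notes on version B (the rewrite author's own statement) =====
-- stated objective: faster
-- what changed: Replaces the set-intersection pass plus the quadratic nested index scan with a single dict mapping each library value to its list of indices, so per-game index lookup is O(1).
import Mathlib
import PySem

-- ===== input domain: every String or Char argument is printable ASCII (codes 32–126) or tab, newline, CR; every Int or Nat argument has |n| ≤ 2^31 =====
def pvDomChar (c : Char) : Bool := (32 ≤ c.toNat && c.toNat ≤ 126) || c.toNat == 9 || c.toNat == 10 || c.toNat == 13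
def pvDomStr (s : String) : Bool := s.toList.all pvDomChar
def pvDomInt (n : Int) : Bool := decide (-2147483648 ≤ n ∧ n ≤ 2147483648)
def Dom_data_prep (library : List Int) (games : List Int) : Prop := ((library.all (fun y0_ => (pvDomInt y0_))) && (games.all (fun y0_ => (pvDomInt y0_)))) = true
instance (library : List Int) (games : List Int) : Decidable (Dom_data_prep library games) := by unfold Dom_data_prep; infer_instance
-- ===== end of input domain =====

-- ===== PORT A =====
-- B builds one dict value -> library indices instead of A's set intersection + O(n*m) nested scan (faster, asymptotic in a timing run).
def data_prep (library : List Int) (games : List Int) : List Int × List Int :=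
  let library_set := PySem.Set.ofList library
  let games_set := PySem.Set.ofList games
  let prep_user := PySem.Set.inter library_set games_set
  let prep_game := games.foldl (fun acc game =>
      if PySem.Set.contains prep_user game then acc ++ [game] else acc) []
  let index := (PySem.List.pyRange 0 (PySem.List.len prep_game)).foldl (fun index i =>
      (PySem.List.pyRange 0 (PySem.List.len library)).foldl (fun index j =>
        if PySem.List.pyGetD prep_game i 0 == PySem.List.pyGetD library j 0
        then index ++ [j] else index) index) []
  (PySem.Set.ofList prep_game, index)

-- ===== PORT B =====
-- idx.setdefault(v, []).append(j) extends the stored list in place, i.e. d[v] = d.get(v, []) + [j] at v's original position = Dict.modify.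
def data_prep_alt (library : List Int) (games : List Int) : List Int × List Int :=
  let idx := (PySem.List.enumerate library).foldl
      (fun d p => d.modify p.2 [] (fun l => l ++ [p.1])) PySem.Dict.empty
  let prep_game := games.filter (fun g => idx.contains g)
  let index := prep_game.flatMap (fun g => idx.getD g [])
  (PySem.Set.ofList prep_game, index)

-- ===== PRECONDITION & SPEC =====
def Spec_data_prep (library : List Int) (games : List Int) (out : List Int × List Int) : Prop := out = data_prep_alt library games
instance (library : List Int) (games : List Int) (out : List Int × List Int) : Decidable (Spec_data_prep library games out) := by unfold Spec_data_prep; infer_instance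

-- ===== CLAIM (what is proved, stated in full; the proofs are below) =====
def Claim_equal_data_prep : Prop := ∀ (library : List Int) (games : List Int), Dom_data_prep library games → Spec_data_prep library games (data_prep library games)

-- ===== LEMMAS AND PROOFS =====

-- B's dict lookup: the indices j (in order) with library[j] == g
theorem idx_getD (library : List Int) (g : Int) :
    ((PySem.List.enumerate library).foldl
        (fun d p => d.modify p.2 [] (fun l => l ++ [p.1])) PySem.Dict.empty).getD g []
      = (PySem.List.pyRange 0 (PySem.List.len library)).filter
          (fun j => PySem.List.pyGetD library j 0 == g) := by
  have h := PySem.Dict.getD_foldl_modify_append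
      ((PySem.List.enumerate library).map (fun p : Int × Int => (p.2, p.1))) PySem.Dict.empty g
  rw [List.foldl_map] at h
  refine h.trans ?_
  rw [PySem.List.enumerate_eq_map_pyRange library 0]
  simp [List.filter_map, Function.comp_def, PySem.Dict.getD_empty]

-- B's dict membership test is membership in the library
theorem idx_contains (library : List Int) (g : Int) :
    ((PySem.List.enumerate library).foldl
        (fun d p => d.modify p.2 [] (fun l => l ++ [p.1])) PySem.Dict.empty).contains g
      = decide (g ∈ library) := by
  rw [PySem.Dict.contains_eq_decide_mem_keys, PySem.Dict.keys_foldl_modify_key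
        (key := fun p : Int × Int => p.2) (f := fun d p l => l ++ [p.1])]
  simp [PySem.Dict.keys_empty, PySem.Set.update_nil_left, PySem.List.map_snd_enumerate,
        PySem.Set.mem_ofList]

-- A's nested index loops compute, per element of prep_game in order, its occurrence indices in library
theorem index_loops_eq (library prep : List Int) :
    (PySem.List.pyRange 0 (PySem.List.len prep)).foldl (fun index i =>
        (PySem.List.pyRange 0 (PySem.List.len library)).foldl (fun index j =>
          if PySem.List.pyGetD prep i 0 == PySem.List.pyGetD library j 0
          then index ++ [j] else index) index) []
      = prep.flatMap (fun g => (PySem.List.pyRange 0 (PySem.List.len library)).filter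
          (fun j => PySem.List.pyGetD library j 0 == g)) := by
  have hinner : ∀ (i : Int) (acc : List Int),
      (PySem.List.pyRange 0 (PySem.List.len library)).foldl (fun index j =>
          if PySem.List.pyGetD prep i 0 == PySem.List.pyGetD library j 0
          then index ++ [j] else index) acc
        = acc ++ (PySem.List.pyRange 0 (PySem.List.len library)).filter
            (fun j => PySem.List.pyGetD library j 0 == PySem.List.pyGetD prep i 0) := by
    intro i acc
    rw [PySem.List.foldl_append_if_eq_filter
          (p := fun j => PySem.List.pyGetD prep i 0 == PySem.List.pyGetD library j 0)]
    congr 1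
    exact List.filter_congr (fun j _ => by simp [eq_comm])
  calc (PySem.List.pyRange 0 (PySem.List.len prep)).foldl (fun index i =>
        (PySem.List.pyRange 0 (PySem.List.len library)).foldl (fun index j =>
          if PySem.List.pyGetD prep i 0 == PySem.List.pyGetD library j 0
          then index ++ [j] else index) index) []
      = (PySem.List.pyRange 0 (PySem.List.len prep)).foldl (fun index i =>
          index ++ (PySem.List.pyRange 0 (PySem.List.len library)).filter
            (fun j => PySem.List.pyGetD library j 0 == PySem.List.pyGetD prep i 0)) [] := by
        exact PySem.List.foldl_congr_mem _ _ _ _ (fun acc i _ => hinner i acc)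
    _ = (PySem.List.pyRange 0 (PySem.List.len prep)).flatMap (fun i =>
          (PySem.List.pyRange 0 (PySem.List.len library)).filter
            (fun j => PySem.List.pyGetD library j 0 == PySem.List.pyGetD prep i 0)) := by
        rw [PySem.List.foldl_append_eq_flatMap]; rfl
    _ = _ := by
        conv_rhs => rw [← PySem.List.map_pyGetD_pyRange_zero prep 0]
        rw [List.flatMap_map]

-- ===== VERDICT (by name: the statement is the Claim_ definition above) =====
theorem data_prep_spec : Claim_equal_data_prep := by
  intro library games _
  unfold Spec_data_prep data_prep data_prep_alt
  dsimp only
  have hprep : games.foldl (fun acc game =>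
      if PySem.Set.contains (PySem.Set.inter (PySem.Set.ofList library) (PySem.Set.ofList games)) game
      then acc ++ [game] else acc) []
      = games.filter (fun g =>
          ((PySem.List.enumerate library).foldl
            (fun d p => d.modify p.2 [] (fun l => l ++ [p.1])) PySem.Dict.empty).contains g) := by
    rw [PySem.List.foldl_append_if_eq_filter]
    refine (List.nil_append _).trans (List.filter_congr fun g hg => ?_)
    rw [idx_contains]
    rw [Bool.eq_iff_iff, PySem.Set.contains_iff]
    simp [PySem.Set.mem_inter, PySem.Set.mem_ofList, hg]
  rw [hprep, index_loops_eq]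
  refine Prod.ext rfl ?_
  exact List.flatMap_congr (fun g _ => (idx_getD library g).symm)
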